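-- pv_equiv track=rewrite | github.com/0cto98/Python-Refresher | tp1_2.py | count_genres_with_loop
-- ===== SOURCE A (Python) =====
-- from operator import itemgetter #to sort list of tuples
--
-- def count_genres_with_loop(movies):
--     dict = {}
--     for movie in movies:
--         for genre in movies[movie]["genres"]:
--             if genre in dict:
--                 dict[genre] += 1    #if genre already exists, we add 1
--             else:
--                 dict[genre] = 1     #otherwise we create it and initialize it to 1
--     #Then we "translate" dict to an array to fit what is asked
--     genres_array = []
--     for genre in dict:
--         genres_array.append((genre,dict[genre]))
--     genres_array.sort(key=itemgetter(0))
--     return genres_array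
-- ===== SOURCE B (Python) =====
-- from itertools import groupby
--
-- def count_genres_with_loop(movies):
--     # flatten every genre occurrence, sort, then group adjacent equal genres
--     all_genres = sorted(g for movie in movies for g in movies[movie]["genres"])
--     return [(genre, len(list(group))) for genre, group in groupby(all_genres)]
-- ===== Notes on version B (the rewrite author's own statement) =====
-- stated objective: alternative
-- what changed: Replaces A's hash-table accumulation (dict of counts built by a membership-tested increment loop) followed by a final sort with a flatten-sort-then-groupby pass: all genre occurrences are flattened into one list, sorted, and adjacent equal runs are emitted as (genre, run length), already in key order.
import Mathlib
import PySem

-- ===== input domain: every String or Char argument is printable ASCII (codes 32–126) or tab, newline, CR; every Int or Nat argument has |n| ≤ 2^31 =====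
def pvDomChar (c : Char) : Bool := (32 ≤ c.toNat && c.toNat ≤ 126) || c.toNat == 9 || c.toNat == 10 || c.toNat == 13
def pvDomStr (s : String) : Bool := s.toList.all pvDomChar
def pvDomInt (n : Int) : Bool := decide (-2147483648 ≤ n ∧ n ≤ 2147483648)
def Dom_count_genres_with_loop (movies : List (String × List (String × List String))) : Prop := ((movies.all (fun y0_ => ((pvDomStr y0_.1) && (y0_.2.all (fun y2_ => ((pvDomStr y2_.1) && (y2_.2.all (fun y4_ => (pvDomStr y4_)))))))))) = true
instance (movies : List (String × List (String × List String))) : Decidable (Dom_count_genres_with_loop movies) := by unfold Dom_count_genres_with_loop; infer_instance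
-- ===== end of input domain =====

-- B replaces A's hash-table accumulation + final sort by flatten-sort-then-group-adjacent-runs (alternative algorithm, same asymptotic cost).

-- ===== PORT A =====
-- one step of A's inner loop: 'if genre in dict: dict[genre] += 1 else: dict[genre] = 1'
def pvAStep (d : PySem.Dict String Int) (genre : String) : PySem.Dict String Int :=
  if d.contains genre then d.insert genre (d.getD genre 0 + 1) else d.insert genre 1

def count_genres_with_loop (movies : List (String × List (String × List String))) : List (String × Int) :=
  -- 'for movie in movies: for genre in movies[movie]["genres"]: …' — movies and each value are Python
  -- dicts, so we iterate (Dict.ofList movies).items; ["genres"] is totalised by getD (Pre_ excludes the KeyError inputs)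
  -- 'for genre in dict: genres_array.append((genre, dict[genre]))' — since a dict's keys are unique,
  -- iterating the keys and looking each one up rebuilds exactly d.items
  PySem.List.sorted
    (((PySem.Dict.ofList movies).items.foldl
        (fun d p => ((PySem.Dict.ofList p.2).getD "genres" []).foldl pvAStep d)
        PySem.Dict.empty).items)
    (fun p => p.1) false

-- ===== PORT B =====
-- itertools.groupby on a list + len(list(group)) per group: emit (run head, run length) for each maximal run
def pvGroupRuns : List String → List (String × Int)
  | [] => []
  | x :: xs =>
      (x, ((xs.takeWhile (· == x)).length : Int) + 1) :: pvGroupRuns (xs.dropWhile (· == x))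
  termination_by s => s.length
  decreasing_by
    exact Nat.lt_succ_of_le (List.length_dropWhile_le _ _)

def count_genres_with_loop_alt (movies : List (String × List (String × List String))) : List (String × Int) :=
  pvGroupRuns
    (PySem.List.sorted
      ((PySem.Dict.ofList movies).items.flatMap (fun p => (PySem.Dict.ofList p.2).getD "genres" []))
      (fun g => g) false)

-- ===== PRECONDITION & SPEC =====
-- Pre_ excludes exactly the inputs where Python raises KeyError: some movie's dict has no "genres" key.
def Pre_count_genres_with_loop (movies : List (String × List (String × List String))) : Prop :=
  ∀ p ∈ movies, ∃ q ∈ p.2, q.1 = "genres"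
instance (movies : List (String × List (String × List String))) : Decidable (Pre_count_genres_with_loop movies) := by unfold Pre_count_genres_with_loop; infer_instance

def pvWitness_count_genres_with_loop : (List (String × List (String × List String))) :=
  [("m1", [("genres", ["drama", "comedy", "drama"])]), ("m2", [("genres", ["comedy"]), ("year", [])])]

def Spec_count_genres_with_loop (movies : List (String × List (String × List String))) (out : List (String × Int)) : Prop := out = count_genres_with_loop_alt movies
instance (movies : List (String × List (String × List String))) (out : List (String × Int)) : Decidable (Spec_count_genres_with_loop movies out) := by unfold Spec_count_genres_with_loop; infer_instance

-- ===== CLAIM (what is proved, stated in full; the proofs are below) =====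
def Claim_equal_count_genres_with_loop : Prop := ∀ (movies : List (String × List (String × List String))), Dom_count_genres_with_loop movies → Pre_count_genres_with_loop movies → Spec_count_genres_with_loop movies (count_genres_with_loop movies)

-- ===== LEMMAS AND PROOFS =====

-- A's branching step is the unconditional counting step.
theorem pvAStep_eq : pvAStep = fun d g => d.insert g (d.getD g 0 + 1) := by
  funext d g
  unfold pvAStep
  by_cases h : d.contains g = true
  · simp [h]
  · simp only [Bool.not_eq_true] at h
    simp [h, PySem.Dict.getD_of_not_contains d 0 h]

-- in a ≤-sorted list, everything after the leading run of x is strictly greater than x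
theorem pv_dropWhile_gt (x : String) (xs : List String)
    (hle : ∀ z ∈ xs, x ≤ z) (hp : xs.Pairwise (· ≤ ·)) :
    ∀ z ∈ xs.dropWhile (· == x), x < z := by
  intro z hz
  rcases hr : xs.dropWhile (· == x) with _ | ⟨y, r⟩
  · simp [hr] at hz
  · have hne : ¬ (y == x) = true := by
      have := List.head_dropWhile_not (· == x) (l := xs) (by simp [hr])
      simpa [hr] using this
    have hyx : y ≠ x := by simpa using hne
    have hymem : y ∈ xs := (List.dropWhile_sublist (· == x)).mem (by simp [hr])
    have hxy : x < y := lt_of_le_of_ne (hle y hymem) (Ne.symm hyx)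
    have hpr : (y :: r).Pairwise (· ≤ ·) := by
      rw [← hr]; exact List.Pairwise.sublist (List.dropWhile_sublist (· == x)) hp
    rw [hr] at hz
    rcases List.mem_cons.mp hz with h1 | h1
    · exact h1 ▸ hxy
    · exact lt_of_lt_of_le hxy ((List.pairwise_cons.mp hpr).1 z h1)

-- main characterisation of pvGroupRuns on a ≤-sorted list
theorem pvGroupRuns_spec (s : List String) (h : s.Pairwise (· ≤ ·)) :
    (∀ p ∈ pvGroupRuns s, p.1 ∈ s ∧ p.2 = (s.count p.1 : Int)) ∧
    (∀ k, k ∈ (pvGroupRuns s).map Prod.fst ↔ k ∈ s) ∧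
    (pvGroupRuns s).Pairwise (fun a b => a.1 < b.1) := by
  induction s using pvGroupRuns.induct with
  | case1 => simp [pvGroupRuns]
  | case2 x xs ih =>
    have hle : ∀ z ∈ xs, x ≤ z := (List.pairwise_cons.mp h).1
    have hxs : xs.Pairwise (· ≤ ·) := (List.pairwise_cons.mp h).2
    have hgt : ∀ z ∈ xs.dropWhile (· == x), x < z := pv_dropWhile_gt x xs hle hxs
    have hrp : (xs.dropWhile (· == x)).Pairwise (· ≤ ·) :=
      List.Pairwise.sublist (List.dropWhile_sublist (· == x)) hxs
    obtain ⟨ih1, ih2, ih3⟩ := ih hrp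
    have hxr : x ∉ xs.dropWhile (· == x) := fun hmem => lt_irrefl x (hgt x hmem)
    have htx : ∀ z ∈ xs.takeWhile (· == x), z = x := fun z hz => by
      simpa using List.mem_takeWhile_imp hz
    have hsplit : xs.takeWhile (· == x) ++ xs.dropWhile (· == x) = xs :=
      List.takeWhile_append_dropWhile
    -- count of x in the whole list is the leading-run length + 1
    have hcx : (x :: xs).count x = (xs.takeWhile (· == x)).length + 1 := by
      rw [List.count_cons_self]
      conv_lhs => rw [← hsplit]
      rw [List.count_append,
          List.count_eq_length.mpr (fun b hb => (htx b hb).symm),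
          List.count_eq_zero.mpr hxr]
    -- count of any k ≠ x reduces to the tail after the run
    have hck : ∀ k, k ≠ x → (x :: xs).count k = (xs.dropWhile (· == x)).count k := by
      intro k hk
      rw [List.count_cons]
      conv_lhs => rw [← hsplit]
      rw [List.count_append,
          List.count_eq_zero.mpr (fun hmem => hk (htx k hmem))]
      simp [Ne.symm hk]
    have hmem_of_r : ∀ z ∈ xs.dropWhile (· == x), z ∈ x :: xs :=
      fun z hz => List.mem_cons_of_mem x ((List.dropWhile_sublist (· == x)).mem hz)
    rw [pvGroupRuns]
    refine ⟨?_, ?_, ?_⟩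
    · intro p hp
      rcases List.mem_cons.mp hp with h1 | h1
      · subst h1
        exact ⟨List.mem_cons_self, by rw [hcx]; push_cast; ring⟩
      · obtain ⟨hp1, hp2⟩ := ih1 p h1
        have hne : p.1 ≠ x := fun he => lt_irrefl x (he ▸ hgt p.1 hp1)
        exact ⟨hmem_of_r p.1 hp1, by rw [hp2, hck p.1 hne]⟩
    · intro k
      simp only [List.map_cons, List.mem_cons, ih2]
      constructor
      · rintro (rfl | hk)
        · exact Or.inl rfl
        · exact List.mem_cons.mp (hmem_of_r k hk)
      · intro hk
        rcases hk with rfl | hk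
        · exact Or.inl rfl
        · rw [← hsplit] at hk
          rcases List.mem_append.mp hk with hk2 | hk2
          · exact Or.inl (htx k hk2)
          · exact Or.inr hk2
    · refine List.pairwise_cons.mpr ⟨?_, ih3⟩
      intro q hq
      exact hgt q.1 (ih1 q hq).1

-- a list of pairs whose second components are a function of the first is a map over its first components
theorem pv_eq_map_fst {β : Type} (l : List (String × β)) (g : String → β)
    (h : ∀ p ∈ l, p.2 = g p.1) : l = (l.map Prod.fst).map (fun k => (k, g k)) := by
  induction l with
  | nil => rfl
  | cons p t ih =>
    have hp := h p List.mem_cons_self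
    simp only [List.map_cons]
    rw [← ih (fun q hq => h q (List.mem_cons_of_mem p hq)), ← hp]

-- ===== VERDICT (by name: the statement is the Claim_ definition above) =====
theorem count_genres_with_loop_spec : Claim_equal_count_genres_with_loop := by
  intro movies _ _
  unfold Spec_count_genres_with_loop count_genres_with_loop count_genres_with_loop_alt
  rw [pvAStep_eq, ← List.foldl_flatMap,
      PySem.Dict.foldl_insert_getD_add_one_eq_counter, PySem.Dict.items_counter]
  set flat := (PySem.Dict.ofList movies).items.flatMap
      (fun p => (PySem.Dict.ofList p.2).getD "genres" []) with hflat
  set s := PySem.List.sorted flat (fun g => g) false with hs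
  have hsp : s.Pairwise (· ≤ ·) := PySem.List.sorted_pairwise flat (fun g => g)
  obtain ⟨h1, h2, h3⟩ := pvGroupRuns_spec s hsp
  have hscount : ∀ k, s.count k = flat.count k :=
    fun k => (PySem.List.sorted_perm flat (fun g => g) false).count_eq k
  -- the grouped runs are a permutation of counter's items
  have hmap : pvGroupRuns s
      = ((pvGroupRuns s).map Prod.fst).map (fun k => (k, (flat.count k : Int))) :=
    pv_eq_map_fst _ _ (fun p hp => by rw [(h1 p hp).2, hscount])
  have hnd : ((pvGroupRuns s).map Prod.fst).Nodup :=
    (List.pairwise_map.mpr h3).imp (fun hlt => ne_of_lt hlt)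
  have hpermfst : ((pvGroupRuns s).map Prod.fst).Perm (PySem.Set.ofList flat) := by
    refine (List.perm_ext_iff_of_nodup hnd (PySem.Set.nodup_ofList flat)).mpr ?_
    intro k
    rw [h2 k, PySem.Set.mem_ofList, hs, PySem.List.mem_sorted]
  have hperm : (pvGroupRuns s).Perm
      ((PySem.Set.ofList flat).map (fun k => (k, (flat.count k : Int)))) := by
    rw [hmap]; exact hpermfst.map _
  exact PySem.List.sorted_eq_of_perm_of_pairwise_lt _ _ _ hperm h3
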